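-- pv_equiv track=rewrite | github.com/aeolus-earth/sonde | cli/src/sonde/local.py | extract_finding_text
-- ===== SOURCE A (Python) =====
-- def extract_finding_text(content: str) -> str | None:
--     """Extract a finding summary from content-first markdown."""
--     body = content.strip()
--     if not body:
--         return None
--
--     lines = body.splitlines()
--     for idx, line in enumerate(lines):
--         if line.strip().lower() == "## finding":
--             collected: list[str] = []
--             for next_line in lines[idx + 1 :]:
--                 if next_line.startswith("#"):
--                     break
--                 collected.append(next_line)
--             text = "\n".join(collected).strip()
--             if text:
--                 return text
--
--     for paragraph in (part.strip() for part in body.split("\n\n")):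
--         if paragraph and not paragraph.startswith("#"):
--             return paragraph
--     return None
-- ===== SOURCE B (Python) =====
-- def extract_finding_text(content: str) -> str | None:
--     """Extract a finding summary from content-first markdown.
--
--     Single backward pass: walk the lines right-to-left while maintaining the
--     run of lines up to the next '#'-line, so each '## finding' header's body
--     is available without re-scanning; the leftmost non-empty finding wins.
--     """
--     body = content.strip()
--     if not body:
--         return None
--
--     lines = body.splitlines()
--     best = None
--     run: list[str] = []  # lines after the current one up to the next '#'-line, right-to-left
--     for line in reversed(lines):
--         if line.strip().lower() == "## finding":
--             text = "\n".join(reversed(run)).strip()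
--             if text:
--                 best = text  # a later (leftward) header overwrites: first one wins
--         if line.startswith("#"):
--             run = []
--         else:
--             run.append(line)
--     if best is not None:
--         return best
--
--     for part in body.split("\n\n"):
--         paragraph = part.strip()
--         if paragraph and not paragraph.startswith("#"):
--             return paragraph
--     return None
-- ===== Notes on version B (the rewrite author's own statement) =====
-- stated objective: alternative
-- what changed: A rescans the remaining lines after every finding header; B makes one backward pass over the lines, maintaining the run of lines up to the next heading line so each header's body is available without an inner rescan (leftmost non-empty finding kept by overwriting), with the same blank-line paragraph fallback.
import Mathlib
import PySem

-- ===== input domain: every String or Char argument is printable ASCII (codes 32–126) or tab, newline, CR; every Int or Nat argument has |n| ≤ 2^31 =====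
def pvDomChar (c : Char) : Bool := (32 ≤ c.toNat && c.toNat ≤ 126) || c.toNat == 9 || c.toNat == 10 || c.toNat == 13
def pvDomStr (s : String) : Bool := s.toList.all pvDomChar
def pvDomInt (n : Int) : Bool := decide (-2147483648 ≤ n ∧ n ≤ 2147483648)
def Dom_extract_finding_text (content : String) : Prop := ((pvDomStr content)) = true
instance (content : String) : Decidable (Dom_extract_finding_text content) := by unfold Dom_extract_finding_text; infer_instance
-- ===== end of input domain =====

-- B replaces A's per-header rescan of the remaining lines by ONE backward pass that
-- maintains the run of lines up to the next '#'-line (objective: alternative decomposition).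

-- ===== PORT A =====
-- inner loop: collect lines[idx+1:] until a line starting with '#'
def pvACollect : List String → List String
  | [] => []
  | l :: ls => if PySem.Str.startswith l "#" then [] else l :: pvACollect ls

-- outer loop over (line, rest-of-lines); returns on the first non-empty finding body
def pvAScan : List String → Option String
  | [] => none
  | l :: ls =>
    if PySem.Str.lower (PySem.Str.strip l) = "## finding" then
      let text := PySem.Str.strip (PySem.Str.join "\n" (pvACollect ls))
      if text ≠ "" then some text else pvAScan ls
    else pvAScan ls

-- fallback loop over the '\n\n'-paragraphs
def pvAFallback : List String → Option String
  | [] => none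
  | p :: ps =>
    let paragraph := PySem.Str.strip p
    if paragraph ≠ "" ∧ PySem.Str.startswith paragraph "#" = false then some paragraph
    else pvAFallback ps

def extract_finding_text (content : String) : Option String :=
  let body := PySem.Str.strip content
  if body = "" then none
  else
    match pvAScan (PySem.Str.splitlines body) with
    | some t => some t
    | none => pvAFallback ((PySem.Str.split? body "\n\n").getD [])  -- sep "\n\n" ≠ "", so split? is exact here

-- ===== PORT B =====
-- one step of Source B's backward loop; state = (best, run of lines up to next '#'-line, right-to-left)
def pvBStep (st : Option String × List String) (line : String) : Option String × List String :=
  let best :=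
    if PySem.Str.lower (PySem.Str.strip line) = "## finding" then
      let text := PySem.Str.strip (PySem.Str.join "\n" st.2.reverse)
      if text ≠ "" then some text else st.1
    else st.1
  let run := if PySem.Str.startswith line "#" then [] else st.2 ++ [line]
  (best, run)

def pvBFallback : List String → Option String
  | [] => none
  | p :: ps =>
    let paragraph := PySem.Str.strip p
    if paragraph ≠ "" ∧ PySem.Str.startswith paragraph "#" = false then some paragraph
    else pvBFallback ps

def extract_finding_text_alt (content : String) : Option String :=
  let body := PySem.Str.strip content
  if body = "" then none
  else
    let lines := PySem.Str.splitlines body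
    match (lines.reverse.foldl pvBStep (none, [])).1 with
    | some t => some t
    | none => pvBFallback ((PySem.Str.split? body "\n\n").getD [])  -- sep "\n\n" ≠ "", so split? is exact here

-- ===== PRECONDITION & SPEC =====
def Spec_extract_finding_text (content : String) (out : Option String) : Prop := out = extract_finding_text_alt content
instance (content : String) (out : Option String) : Decidable (Spec_extract_finding_text content out) := by unfold Spec_extract_finding_text; infer_instance

-- ===== CLAIM (what is proved, stated in full; the proofs are below) =====
def Claim_equal_extract_finding_text : Prop := ∀ (content : String), Dom_extract_finding_text content → Spec_extract_finding_text content (extract_finding_text content)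

-- ===== LEMMAS AND PROOFS =====

-- B's backward fold computes A's scan result and (reversed) A's collection for the current position
theorem pvB_state (ls : List String) :
    ls.reverse.foldl pvBStep (none, []) = (pvAScan ls, (pvACollect ls).reverse) := by
  induction ls with
  | nil => rfl
  | cons l ls ih =>
    simp only [List.reverse_cons, List.foldl_append, List.foldl_cons, List.foldl_nil, ih]
    simp only [pvBStep, pvAScan, pvACollect, List.reverse_reverse]
    split_ifs <;> simp_all

theorem pvFallback_eq (ps : List String) : pvBFallback ps = pvAFallback ps := by
  induction ps with
  | nil => rfl
  | cons p ps ih => simp only [pvBFallback, pvAFallback, ih]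

-- ===== VERDICT (by name: the statement is the Claim_ definition above) =====
theorem extract_finding_text_spec : Claim_equal_extract_finding_text := by
  intro content _
  unfold Spec_extract_finding_text extract_finding_text extract_finding_text_alt
  simp only [pvB_state, pvFallback_eq]
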